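-- pv_equiv track=rewrite | github.com/Xandynhu/LeetCode | Easy/running-sum-of-1d-array-v1.py | foo
-- ===== SOURCE A (Python) =====
-- def foo (input):
--     # define the output array list
--     output = []
--
--     # for each element in the given list, do:
--     for i in range(len(input)):
--         # create an auxiliary variable on each loop
--         aux = 0
--
--         # add all elements from the first till the i-th and put in the back of output array
--         for j in range(i+1):
--         # update aux value with the +next given array
--             aux = aux + input[j]
--
--         # add the new element on the output array
--         output.append(aux)
--
--     return output
-- ===== SOURCE B (Python) =====
-- def foo(input):
--     # single pass: running accumulator instead of re-summing each prefix
--     output = []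
--     acc = 0
--     for x in input:
--         acc += x
--         output.append(acc)
--     return output
-- ===== Notes on version B (the rewrite author's own statement) =====
-- stated objective: faster
-- what changed: Replaces the nested loop that re-sums every prefix from scratch with a single pass carrying a running accumulator.
import Mathlib
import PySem

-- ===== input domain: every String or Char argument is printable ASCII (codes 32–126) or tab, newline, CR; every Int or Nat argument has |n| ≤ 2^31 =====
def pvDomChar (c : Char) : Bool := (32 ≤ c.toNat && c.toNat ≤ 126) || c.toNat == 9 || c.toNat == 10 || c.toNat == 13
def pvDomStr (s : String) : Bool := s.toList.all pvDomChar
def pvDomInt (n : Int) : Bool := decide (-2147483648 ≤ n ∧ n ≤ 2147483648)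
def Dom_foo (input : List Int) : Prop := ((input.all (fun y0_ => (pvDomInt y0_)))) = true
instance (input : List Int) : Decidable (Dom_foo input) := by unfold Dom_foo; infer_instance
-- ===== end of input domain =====

-- B replaces A's quadratic prefix re-summation by one pass with a running accumulator (faster, asymptotic).

-- ===== PORT A =====
-- A: for i in range(len(input)): aux = 0; for j in range(i+1): aux += input[j]; output.append(aux)
def foo (input : List Int) : List Int :=
  (PySem.List.pyRange 0 (input.length : Int) 1).foldl
    (fun output i =>
      output ++ [ (PySem.List.pyRange 0 (i + 1) 1).foldl
                    (fun aux j => aux + PySem.List.pyGetD input j 0) 0 ])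
    []

-- ===== PORT B =====
-- B: single pass, acc += x, append acc
def fooAltGo (acc : Int) : List Int → List Int
  | [] => []
  | x :: xs => (acc + x) :: fooAltGo (acc + x) xs

def foo_alt (input : List Int) : List Int := fooAltGo 0 input

-- ===== PRECONDITION & SPEC =====
def Spec_foo (input : List Int) (out : List Int) : Prop := out = foo_alt input
instance (input : List Int) (out : List Int) : Decidable (Spec_foo input out) := by unfold Spec_foo; infer_instance

-- ===== CLAIM (what is proved, stated in full; the proofs are below) =====
def Claim_equal_foo : Prop := ∀ (input : List Int), Dom_foo input → Spec_foo input (foo input)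

-- ===== LEMMAS AND PROOFS =====

-- the inner loop of A sums the first m elements
theorem foo_inner_sum (input : List Int) (m : Nat) (hm : m ≤ input.length) :
    (PySem.List.pyRange 0 (m : Int) 1).foldl (fun aux j => aux + PySem.List.pyGetD input j 0) 0
      = (input.take m).sum := by
  induction m with
  | zero => simp [PySem.List.pyRange]
  | succ k ih =>
    have hk : k ≤ input.length := Nat.le_of_succ_le hm
    have hsplit : PySem.List.pyRange 0 ((k : Int) + 1) 1
        = PySem.List.pyRange 0 (k : Int) 1 ++ [(k : Int)] :=
      PySem.List.pyRange_one_succ_right (by exact_mod_cast Nat.zero_le k)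
    have hget : PySem.List.pyGetD input (k : Int) 0 = input[k]'(Nat.lt_of_succ_le hm) :=
      PySem.List.pyGetD_ofNat _ _ _ (Nat.lt_of_succ_le hm)
    rw [show ((k + 1 : Nat) : Int) = (k : Int) + 1 by push_cast; ring, hsplit,
        List.foldl_append, ih hk]
    simp [List.sum_take_succ _ _ (Nat.lt_of_succ_le hm), hget]

-- A's outer loop produces the list of prefix sums
theorem foo_eq_map (input : List Int) :
    foo input = (List.range input.length).map (fun k => (input.take (k + 1)).sum) := by
  unfold foo
  rw [PySem.List.pyRange_one]
  simp only [Int.sub_zero, Int.toNat_natCast, zero_add]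
  rw [List.foldl_map]
  have h : ∀ (l : List Nat), (∀ k ∈ l, k < input.length) → ∀ (acc : List Int),
      l.foldl (fun output (k : Nat) =>
        output ++ [ (PySem.List.pyRange 0 ((k : Int) + 1) 1).foldl
                      (fun aux j => aux + PySem.List.pyGetD input j 0) 0 ]) acc
      = acc ++ l.map (fun k => (input.take (k + 1)).sum) := by
    intro l
    induction l with
    | nil => intro _ acc; simp
    | cons a t ih =>
      intro hmem acc
      have ha : a < input.length := hmem a (List.mem_cons_self)
      have : ((a : Int) + 1) = ((a + 1 : Nat) : Int) := by push_cast; ring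
      simp only [List.foldl_cons, this, foo_inner_sum input (a + 1) (Nat.succ_le_of_lt ha),
        List.map_cons]
      rw [ih (fun k hk => hmem k (List.mem_cons_of_mem a hk))]
      simp
  rw [h (List.range input.length) (fun k hk => List.mem_range.mp hk) []]
  simp

-- B produces the same prefix sums, shifted by the accumulator
theorem fooAltGo_eq_map (xs : List Int) : ∀ (acc : Int),
    fooAltGo acc xs = (List.range xs.length).map (fun k => acc + (xs.take (k + 1)).sum) := by
  induction xs with
  | nil => intro acc; simp [fooAltGo]
  | cons x t ih =>
    intro acc
    simp only [fooAltGo, List.length_cons, List.range_succ_eq_map, List.map_cons, List.map_map]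
    rw [ih (acc + x)]
    congr 1
    · simp
    · apply List.map_congr_left
      intro k _
      simp [List.take_succ_cons]
      ring

-- ===== VERDICT (by name: the statement is the Claim_ definition above) =====
theorem foo_spec : Claim_equal_foo := by
  intro input _
  unfold Spec_foo foo_alt
  rw [foo_eq_map, fooAltGo_eq_map]
  simp
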